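-- pv_equiv track=rewrite | github.com/sbell8-chwy/euler | p90.py | fill_single_die
-- ===== SOURCE A (Python) =====
-- def fill_single_die(die):
--     if len(die) == 6:
--         return [sorted(die)];
--     if len(die) == 5:
--         full_dice = [];
--         for i in range(10):
--             if i not in die:
--                 full_die = die + (i,);
--                 full_dice.append(sorted(full_die));
--         return full_dice;
--     if len(die) == 4:
--         full_dice = [];
--         for i in range(10):
--             if i not in die:
--                 for j in range(i + 1, 10):
--                     if j not in die:
--                         full_die = die + (i, j);
--                         full_dice.append(sorted(full_die));
--         return full_dice;
-- ===== SOURCE B (Python) =====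
-- def _combos(vals, k):
--     if k == 0:
--         return [[]]
--     if not vals:
--         return []
--     head, rest = vals[0], vals[1:]
--     return [[head] + c for c in _combos(rest, k - 1)] + _combos(rest, k)
--
-- def fill_single_die(die):
--     k = 6 - len(die)
--     if k < 0 or k > 2:
--         return None
--     missing = [v for v in range(10) if v not in die]
--     return [sorted(list(die) + combo) for combo in _combos(missing, k)]
-- ===== Notes on version B (the rewrite author's own statement) =====
-- stated objective: simpler
-- what changed: Replaces A's three hardcoded length branches (separate single and nested double loops over range(10)) with one uniform pass: compute the missing values once and enumerate k-element combinations of them with a small recursive combinations helper.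
-- outside the precondition, e.g. on fill_single_die((1, 2, 3)): A returns None, B returns None
import Mathlib
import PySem

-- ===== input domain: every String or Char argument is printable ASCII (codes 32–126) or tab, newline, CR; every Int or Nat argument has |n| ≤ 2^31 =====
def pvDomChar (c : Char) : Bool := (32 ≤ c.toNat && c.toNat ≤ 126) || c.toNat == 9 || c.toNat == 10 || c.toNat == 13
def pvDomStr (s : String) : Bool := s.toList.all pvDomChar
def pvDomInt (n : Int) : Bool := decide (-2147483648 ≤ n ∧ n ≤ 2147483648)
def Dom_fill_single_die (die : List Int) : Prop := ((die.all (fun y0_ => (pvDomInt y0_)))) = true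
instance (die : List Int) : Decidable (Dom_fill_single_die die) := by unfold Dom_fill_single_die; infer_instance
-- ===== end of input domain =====

-- B replaces A's three hardcoded length branches with one combinations-driven pass
-- over the missing face values (objective: simpler).

-- ===== PORT A =====
def fill_single_die (die : List Int) : List (List Int) :=
  if die.length = 6 then [PySem.List.sorted die (fun x => x) false]
  else if die.length = 5 then
    (PySem.List.pyRange 0 10 1).foldl (fun full_dice i =>
      if !die.contains i then full_dice ++ [PySem.List.sorted (die ++ [i]) (fun x => x) false]
      else full_dice) []
  else if die.length = 4 then
    (PySem.List.pyRange 0 10 1).foldl (fun full_dice i =>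
      if !die.contains i then
        (PySem.List.pyRange (i + 1) 10 1).foldl (fun fd j =>
          if !die.contains j then fd ++ [PySem.List.sorted (die ++ [i, j]) (fun x => x) false]
          else fd) full_dice
      else full_dice) []
  else []  -- Python A returns None here (no list value); excluded by Pre_

-- ===== PORT B =====
def pvCombos (vals : List Int) (k : Nat) : List (List Int) :=
  match k, vals with
  | 0, _ => [[]]
  | _ + 1, [] => []
  | k + 1, head :: rest => (pvCombos rest k).map (fun c => head :: c) ++ pvCombos rest (k + 1)

def fill_single_die_alt (die : List Int) : List (List Int) :=
  -- k = 6 - len(die); None (excluded by Pre_) when k < 0 or k > 2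
  if (6 - (die.length : Int)) < 0 ∨ 2 < (6 - (die.length : Int)) then []
  else
    (pvCombos ((PySem.List.pyRange 0 10 1).filter (fun v => !die.contains v))
        (6 - (die.length : Int)).toNat).map
      (fun c => PySem.List.sorted (die ++ c) (fun x => x) false)

-- ===== PRECONDITION & SPEC =====
-- Pre_ excludes exactly the lengths other than 4, 5, 6: there Python A falls off the end
-- and returns None, which is not a list of lists.
def Pre_fill_single_die (die : List Int) : Prop :=
  die.length = 4 ∨ die.length = 5 ∨ die.length = 6
instance (die : List Int) : Decidable (Pre_fill_single_die die) := by
  unfold Pre_fill_single_die; infer_instance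

def pvWitness_fill_single_die : List Int := [1, 2, 3, 4, 5]

def Spec_fill_single_die (die : List Int) (out : List (List Int)) : Prop := out = fill_single_die_alt die
instance (die : List Int) (out : List (List Int)) : Decidable (Spec_fill_single_die die out) := by unfold Spec_fill_single_die; infer_instance

-- ===== CLAIM (what is proved, stated in full; the proofs are below) =====
def Claim_equal_fill_single_die : Prop := ∀ (die : List Int), Dom_fill_single_die die → Pre_fill_single_die die → Spec_fill_single_die die (fill_single_die die)

-- ===== LEMMAS AND PROOFS =====

theorem pvRange10 : PySem.List.pyRange 0 10 1 = [0, 1, 2, 3, 4, 5, 6, 7, 8, 9] := by decide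

-- one-element combinations
theorem pvCombos_one (vs : List Int) : pvCombos vs 1 = vs.map (fun v => [v]) := by
  induction vs with
  | nil => rfl
  | cons v rest ih => simp [pvCombos, ih]

-- two-element combinations of a strictly increasing list, as A's nested loops produce them
theorem pvCombos_two (M : List Int) (h : M.Pairwise (· < ·)) :
    pvCombos M 2 = M.flatMap (fun i => (M.filter (fun j => decide (i < j))).map (fun j => [i, j])) := by
  induction M with
  | nil => rfl
  | cons v rest ih =>
    rcases List.pairwise_cons.mp h with ⟨hv, hrest⟩
    have h1 : rest.filter (fun j => decide (v < j)) = rest := by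
      apply List.filter_eq_self.mpr
      intro j hj; exact decide_eq_true (hv j hj)
    have h2 : ∀ i ∈ rest, ((v :: rest).filter (fun j => decide (i < j))) = rest.filter (fun j => decide (i < j)) := by
      intro i hi
      have : ¬ (i < v) := not_lt.mpr (le_of_lt (hv i hi))
      simp [this]
    calc pvCombos (v :: rest) 2
        = (pvCombos rest 1).map (fun c => v :: c) ++ pvCombos rest 2 := rfl
      _ = rest.map (fun j => [v, j]) ++ pvCombos rest 2 := by
          rw [pvCombos_one, List.map_map]; rfl
      _ = ((v :: rest).filter (fun j => decide (v < j))).map (fun j => [v, j]) ++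
            rest.flatMap (fun i => ((v :: rest).filter (fun j => decide (i < j))).map (fun j => [i, j])) := by
          rw [ih hrest]
          simp only [List.filter_cons, decide_eq_true_eq, lt_irrefl, decide_false]
          rw [h1]
          congr 1
          exact (List.flatMap_congr (fun i hi => by
            simp [not_lt.mpr (le_of_lt (hv i hi))])).symm
      _ = (v :: rest).flatMap (fun i => ((v :: rest).filter (fun j => decide (i < j))).map (fun j => [i, j])) := by
          rw [List.flatMap_cons]

-- the inner range of A's len-4 branch, filtered, is the tail of the missing list beyond i
theorem pvRangeTail (p : Int → Bool) (i : Int) (hi : i ∈ ([0,1,2,3,4,5,6,7,8,9] : List Int)) :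
    (PySem.List.pyRange (i + 1) 10 1).filter p =
      (([0,1,2,3,4,5,6,7,8,9] : List Int).filter p).filter (fun j => decide (i < j)) := by
  have hr : ∀ c ∈ ([0,1,2,3,4,5,6,7,8,9] : List Int),
      PySem.List.pyRange (c + 1) 10 1 =
        ([0,1,2,3,4,5,6,7,8,9] : List Int).filter (fun j => decide (c < j)) := by decide
  rw [hr i hi]
  simp [List.filter_filter, Bool.and_comm]

-- ===== VERDICT (by name: the statement is the Claim_ definition above) =====
theorem fill_single_die_spec : Claim_equal_fill_single_die := by
  intro die _ hpre
  unfold Spec_fill_single_die fill_single_die fill_single_die_alt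
  rcases hpre with h4 | h5 | h6
  · -- length 4: A's nested loops vs B's 2-element combinations of the missing list
    have hM : (([0,1,2,3,4,5,6,7,8,9] : List Int).filter (fun v => !die.contains v)).Pairwise (· < ·) :=
      List.Pairwise.filter _ (by decide)
    simp only [h4]
    rw [if_neg (by decide), if_neg (by decide), if_pos (by trivial), if_neg (by norm_num),
        show ((6:Int) - ((4:Nat) : Int)).toNat = 2 from by decide]
    simp only [PySem.List.foldl_append_if]
    rw [PySem.List.foldl_if_eq_foldl_filter, PySem.List.foldl_append_eq_flatMap, pvRange10,
        pvCombos_two _ hM, List.map_flatMap, List.nil_append]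
    refine List.flatMap_congr (fun i hi => ?_)
    have hi' : i ∈ ([0,1,2,3,4,5,6,7,8,9] : List Int) := List.mem_of_mem_filter hi
    rw [pvRangeTail _ i hi', List.map_map]
    rfl
  · -- length 5
    simp only [h5]
    rw [if_neg (by decide), if_pos (by trivial), if_neg (by norm_num),
        show ((6:Int) - ((5:Nat) : Int)).toNat = 1 from by decide, pvRange10]
    rw [PySem.List.foldl_append_if, pvCombos_one, List.map_map, List.nil_append]
    rfl
  · -- length 6
    simp only [h6]
    rw [if_pos (by trivial), if_neg (by norm_num),
        show ((6:Int) - ((6:Nat) : Int)).toNat = 0 from by decide]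
    simp [pvCombos]
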